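-- pv_equiv track=rewrite | github.com/Natneam/competitive-programming | a2sv camp problems contests and more/Contests/A2SV - Africa to Silicon Valley - Fall Camp 2021 Contest 11/D. Zero Remainder Array.py | solve
-- ===== SOURCE A (Python) =====
-- from typing import DefaultDict
--
-- def solve(arr, k):
--     arr = [k - (x%k) for x in arr if (x%k)]
--     freq = DefaultDict(int)
--
--     #if we don't have any reminder
--     if len(arr) == 0:
--         return 0
--
--     for i in arr:
--         freq[i] += 1
--
--     # find the maximum frequency
--     maximum = [arr[0], 0]
--     for i in freq:
--         if freq[i] > maximum[1]:
--             maximum = [i, freq[i]]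
--         elif freq[i] == maximum[1] and i > maximum[0]:
--             maximum[0] = i
--     return (maximum[1] - 1) * k + maximum[0] + 1
-- ===== SOURCE B (Python) =====
-- def solve(arr, k):
--     # sort-then-scan: sort the needed increments, find the longest run
--     # (ties -> later, i.e. larger value), then apply the completion formula once
--     needs = sorted(k - x % k for x in arr if x % k != 0)
--     bestc = 0
--     bestv = 0
--     run = 0
--     prev = None
--     for v in needs:
--         run = run + 1 if v == prev else 1
--         prev = v
--         if run >= bestc:
--             bestc, bestv = run, v
--     if bestc == 0:
--         return 0
--     return (bestc - 1) * k + bestv + 1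
-- ===== Notes on version B (the rewrite author's own statement) =====
-- stated objective: alternative
-- what changed: B replaces A's defaultdict frequency table and manual argmax loop over the dict by sorting the needed increments and doing a run-length scan of the sorted list to find the dominant group (ties resolved toward the larger value by the ascending order), then applies the completion formula once.
import Mathlib
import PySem

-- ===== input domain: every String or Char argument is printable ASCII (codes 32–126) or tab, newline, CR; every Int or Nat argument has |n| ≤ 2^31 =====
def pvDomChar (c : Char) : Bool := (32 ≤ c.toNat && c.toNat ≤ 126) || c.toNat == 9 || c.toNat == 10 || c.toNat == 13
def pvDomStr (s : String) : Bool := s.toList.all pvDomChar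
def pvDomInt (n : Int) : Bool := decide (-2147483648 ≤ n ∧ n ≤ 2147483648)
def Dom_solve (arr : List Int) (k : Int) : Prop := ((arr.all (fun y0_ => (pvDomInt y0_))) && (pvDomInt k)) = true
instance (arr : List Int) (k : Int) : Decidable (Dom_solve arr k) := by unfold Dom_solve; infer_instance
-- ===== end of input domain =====

-- B replaces A's frequency dict + manual argmax loop by sorting the needed increments
-- and a run-length scan of the sorted list (alternative decomposition, same results).

-- ===== PORT A =====
def solve (arr : List Int) (k : Int) : Int :=
  -- arr = [k - (x%k) for x in arr if (x%k)]
  let arr2 := (arr.filter (fun x => !(PySem.Int.mod x k == 0))).map (fun x => k - PySem.Int.mod x k)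
  if arr2.length = 0 then 0
  else
    -- for i in arr: freq[i] += 1   (defaultdict(int))
    let freq := arr2.foldl (fun d i => d.modify i 0 (· + 1)) (PySem.Dict.empty : PySem.Dict Int Int)
    -- maximum = [arr[0], 0]; for i in freq: …
    let m := freq.keys.foldl (fun m i =>
        if freq.getD i 0 > m.2 then (i, freq.getD i 0)
        else if freq.getD i 0 == m.2 && decide (i > m.1) then (i, m.2) else m)
      (PySem.List.pyGetD arr2 0 0, 0)
    (m.2 - 1) * k + m.1 + 1

-- ===== PORT B =====
-- state = (bestc, bestv, run, prev); one step of B's scan over the sorted needs list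
def bstep (st : Int × Int × Int × Option Int) (v : Int) : Int × Int × Int × Option Int :=
  let run' : Int := if st.2.2.2 == some v then st.2.2.1 + 1 else 1
  if st.1 ≤ run' then (run', v, run', some v) else (st.1, st.2.1, run', some v)

def solve_alt (arr : List Int) (k : Int) : Int :=
  -- needs = sorted(k - x % k for x in arr if x % k != 0)
  let needs := PySem.List.sorted
    ((arr.filter (fun x => !(PySem.Int.mod x k == 0))).map (fun x => k - PySem.Int.mod x k))
    (fun v => v) false
  let st := needs.foldl bstep ((0, 0, 0, none) : Int × Int × Int × Option Int)
  if st.1 == 0 then 0 else (st.1 - 1) * k + st.2.1 + 1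

-- ===== PRECONDITION & SPEC =====
-- Pre_ excludes exactly the inputs where Python's x % k raises ZeroDivisionError (in both
-- A and B): k = 0 with a nonempty arr (on an empty arr no % is evaluated and A returns 0).
def Pre_solve (arr : List Int) (k : Int) : Prop := k ≠ 0 ∨ arr = []
instance (arr : List Int) (k : Int) : Decidable (Pre_solve arr k) := by unfold Pre_solve; infer_instance
def pvWitness_solve : List Int × Int := ([1, 2, 3, 5], 3)

def Spec_solve (arr : List Int) (k : Int) (out : Int) : Prop := out = solve_alt arr k
instance (arr : List Int) (k : Int) (out : Int) : Decidable (Spec_solve arr k out) := by unfold Spec_solve; infer_instance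

-- ===== CLAIM (what is proved, stated in full; the proofs are below) =====
def Claim_equal_solve : Prop := ∀ (arr : List Int) (k : Int), Dom_solve arr k → Pre_solve arr k → Spec_solve arr k (solve arr k)

-- ===== LEMMAS AND PROOFS =====

-- the (count, value)-lexicographic maximum of a multiset L, the value both programs select
def IsBest (L : List Int) (v c : Int) : Prop :=
  v ∈ L ∧ c = (L.count v : Int) ∧
    ∀ w ∈ L, (L.count w : Int) < c ∨ ((L.count w : Int) = c ∧ w ≤ v)

theorem isBest_unique (L : List Int) (v1 c1 v2 c2 : Int)
    (h1 : IsBest L v1 c1) (h2 : IsBest L v2 c2) : v1 = v2 ∧ c1 = c2 := by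
  obtain ⟨m1, e1, a1⟩ := h1
  obtain ⟨m2, e2, a2⟩ := h2
  rcases a1 v2 m2 with h | h <;> rcases a2 v1 m1 with h' | h' <;>
    first
    | (exfalso; omega)
    | (constructor <;> omega)

theorem isBest_of_perm (L S : List Int) (hp : S.Perm L) (v c : Int)
    (h : IsBest L v c) : IsBest S v c := by
  obtain ⟨m, e, a⟩ := h
  refine ⟨hp.mem_iff.mpr m, by rw [hp.count_eq]; exact e, fun w hw => ?_⟩
  rw [hp.count_eq]
  exact a w (hp.mem_iff.mp hw)

-- A's argmax loop: invariant for the fold over the (distinct) keys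
theorem afold_isBest (c : Int → Int) :
    ∀ (T P : List Int) (m : Int × Int),
      m.2 = c m.1 → m.1 ∈ P → (∀ w ∈ P, c w < m.2 ∨ (c w = m.2 ∧ w ≤ m.1)) →
      let q := T.foldl (fun m i =>
        if c i > m.2 then (i, c i)
        else if c i == m.2 && decide (i > m.1) then (i, m.2) else m) m
      q.2 = c q.1 ∧ q.1 ∈ P ++ T ∧ ∀ w ∈ P ++ T, c w < q.2 ∨ (c w = q.2 ∧ w ≤ q.1) := by
  intro T
  induction T with
  | nil => intro P m h1 h2 h3; simpa using ⟨h1, h2, h3⟩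
  | cons i T ih =>
    intro P m h1 h2 h3
    simp only [List.foldl_cons]
    have hre : P ++ i :: T = (P ++ [i]) ++ T := by simp
    rw [hre]
    by_cases hgt : c i > m.2
    · simp only [if_pos hgt]
      refine ih (P ++ [i]) (i, c i) rfl (by simp) ?_
      intro w hw
      rcases List.mem_append.mp hw with hw | hw
      · rcases h3 w hw with h | h <;> simp at * <;> omega
      · simp at hw; subst hw; right; exact ⟨rfl, le_refl _⟩
    · simp only [if_neg hgt]
      by_cases htie : c i == m.2 && decide (i > m.1)
      · simp only [if_pos htie]
        simp only [Bool.and_eq_true, beq_iff_eq, decide_eq_true_eq] at htie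
        refine ih (P ++ [i]) (i, m.2) (by simp [← htie.1]) (by simp) ?_
        intro w hw
        rcases List.mem_append.mp hw with hw | hw
        · rcases h3 w hw with h | h
          · left; exact h
          · right; exact ⟨h.1, le_trans h.2 (le_of_lt htie.2)⟩
        · simp at hw; subst hw; right; exact ⟨htie.1, le_refl _⟩
      · simp only [if_neg htie]
        refine ih (P ++ [i]) m h1 (List.mem_append.mpr (Or.inl h2)) ?_
        intro w hw
        rcases List.mem_append.mp hw with hw | hw
        · exact h3 w hw
        · simp at hw; subst hw
          simp only [Bool.and_eq_true, beq_iff_eq, decide_eq_true_eq, not_and, not_lt] at htie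
          rcases lt_or_eq_of_le (not_lt.mp hgt) with h | h
          · left; exact h
          · right; exact ⟨h, htie h⟩

-- B's scan: invariant tying (bestc, bestv, run, prev) to the processed sorted prefix
def BInv (p : List Int) (st : Int × Int × Int × Option Int) : Prop :=
  (p = [] ∧ st = (0, 0, 0, none)) ∨
  (∃ l, st.2.2.2 = some l ∧ l ∈ p ∧ (∀ w ∈ p, w ≤ l) ∧
    st.2.2.1 = (p.count l : Int) ∧ IsBest p st.2.1 st.1)

theorem count_pos_int (L : List Int) (v : Int) (h : v ∈ L) : 0 < (L.count v : Int) := by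
  exact_mod_cast List.count_pos_iff.mpr h

theorem bstep_inv (p : List Int) (st : Int × Int × Int × Option Int) (v : Int)
    (hinv : BInv p st) (hub : ∀ w ∈ p, w ≤ v) : BInv (p ++ [v]) (bstep st v) := by
  obtain ⟨bc, bv, run, prev⟩ := st
  rcases hinv with ⟨hp, hst⟩ | ⟨l, hprev, hl, hle, hrun, hbest⟩
  · -- empty prefix
    injection hst with h1 h2; injection h2 with h2 h3; injection h3 with h3 h4
    subst hp h1 h2 h3 h4
    refine Or.inr ⟨v, ?_⟩
    simp [bstep, IsBest]
  · simp only at hprev hrun hbest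
    subst hprev hrun
    obtain ⟨hbm, hbc, hball⟩ := hbest
    by_cases hv : v = l
    · -- continuing the current run
      subst hv
      have hcnt : ((p ++ [v]).count v : Int) = (p.count v : Int) + 1 := by
        simp [List.count_append]
      have hcnt' : ∀ w, w ≠ v → ((p ++ [v]).count w : Int) = (p.count w : Int) := by
        intro w hw; simp [List.count_append, Ne.symm hw]
      unfold bstep
      simp only [beq_self_eq_true, if_pos]
      by_cases hge : bc ≤ (p.count v : Int) + 1
      · simp only [if_pos hge]
        refine Or.inr ⟨v, rfl, by simp, ?_, by simp [List.count_append], by simp, hcnt.symm, ?_⟩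
        · intro w hw
          rcases List.mem_append.mp hw with hw | hw
          · exact hle w hw
          · simp at hw; omega
        · intro w hw
          rcases List.mem_append.mp hw with hw | hw
          · by_cases hwv : w = v
            · subst hwv; right; exact ⟨hcnt, le_refl _⟩
            · rw [hcnt' w hwv]
              rcases hball w hw with h | h
              · left; omega
              · rcases lt_or_eq_of_le hge with h2 | h2
                · left; omega
                · right; exact ⟨by omega, le_trans h.2 (hle bv hbm)⟩
          · simp at hw; subst hw; right; exact ⟨hcnt, le_refl _⟩
      · simp only [if_neg hge]
        have hbvne : bv ≠ v := by
          intro he; subst he; omega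
        refine Or.inr ⟨v, rfl, by simp, ?_, by simp [List.count_append], List.mem_append.mpr (Or.inl hbm),
          by rw [hcnt' bv hbvne]; exact hbc, ?_⟩
        · intro w hw
          rcases List.mem_append.mp hw with hw | hw
          · exact hle w hw
          · simp at hw; omega
        · intro w hw
          rcases List.mem_append.mp hw with hw | hw
          · by_cases hwv : w = v
            · subst hwv; left; omega
            · rw [hcnt' w hwv]; exact hball w hw
          · simp at hw; subst hw; left; omega
    · -- a fresh (strictly larger) value
      have hlv : l ≤ v := hub l hl
      have hvnot : v ∉ p := by
        intro hvp
        exact hv (le_antisymm (hle v hvp) hlv)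
      have hcnt : ((p ++ [v]).count v : Int) = 1 := by
        simp [List.count_append, List.count_eq_zero_of_not_mem hvnot]
      have hcnt' : ∀ w, w ≠ v → ((p ++ [v]).count w : Int) = (p.count w : Int) := by
        intro w hw; simp [List.count_append, Ne.symm hw]
      have hbc1 : 1 ≤ bc := by
        have := count_pos_int p bv hbm; omega
      unfold bstep
      have hne : (some l == some v) = false := by simp [Ne.symm hv]
      simp only [hne, Bool.false_eq_true, if_false]
      by_cases hge : bc ≤ (1 : Int)
      · simp only [if_pos hge]
        refine Or.inr ⟨v, rfl, by simp, ?_, by simp [List.count_append, List.count_eq_zero_of_not_mem hvnot], by simp, hcnt.symm, ?_⟩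
        · intro w hw
          rcases List.mem_append.mp hw with hw | hw
          · exact le_trans (hle w hw) hlv
          · simp at hw; omega
        · intro w hw
          rcases List.mem_append.mp hw with hw | hw
          · have hwv : w ≠ v := fun he => hvnot (he ▸ hw)
            rw [hcnt' w hwv]
            have h1 := count_pos_int p w hw
            rcases hball w hw with h | h
            · left; omega
            · right; exact ⟨by omega, le_trans (hle w hw) hlv⟩
          · simp at hw; subst hw; right; exact ⟨hcnt, le_refl _⟩
      · simp only [if_neg hge]
        have hbvne : bv ≠ v := fun he => hvnot (he ▸ hbm)
        refine Or.inr ⟨v, rfl, by simp, ?_, by simp [List.count_append, List.count_eq_zero_of_not_mem hvnot], List.mem_append.mpr (Or.inl hbm),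
          by rw [hcnt' bv hbvne]; exact hbc, ?_⟩
        · intro w hw
          rcases List.mem_append.mp hw with hw | hw
          · exact le_trans (hle w hw) hlv
          · simp at hw; omega
        · intro w hw
          rcases List.mem_append.mp hw with hw | hw
          · have hwv : w ≠ v := fun he => hvnot (he ▸ hw)
            rw [hcnt' w hwv]; exact hball w hw
          · simp at hw; subst hw; left; omega

theorem bfold_inv : ∀ (rest p : List Int),
    (∀ a ∈ p, ∀ b ∈ rest, a ≤ b) → rest.Pairwise (· ≤ ·) →
    ∀ (st : Int × Int × Int × Option Int), BInv p st →
    BInv (p ++ rest) (rest.foldl bstep st) := by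
  intro rest
  induction rest with
  | nil => intro p _ _ st h; simpa using h
  | cons v rest ih =>
    intro p hcross hpw st hinv
    rw [List.pairwise_cons] at hpw
    have hstep : BInv (p ++ [v]) (bstep st v) :=
      bstep_inv p st v hinv (fun w hw => hcross w hw v (by simp))
    have := ih (p ++ [v])
      (fun a ha b hb => by
        rcases List.mem_append.mp ha with ha | ha
        · exact hcross a ha b (by simp [hb])
        · simp at ha; subst ha; exact hpw.1 b hb)
      hpw.2 (bstep st v) hstep
    simpa using this

-- PySem.Set.ofList's foldl only ever appends (used for the head of A's key list)
theorem pv_ofList_aux (s : List Int) :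
    ∀ (acc : List Int), ∃ u, List.foldl PySem.Set.add acc s = acc ++ u := by
  induction s with
  | nil => exact fun acc => ⟨[], by simp⟩
  | cons x s ih =>
    intro acc
    rcases ih (PySem.Set.add acc x) with ⟨u, hu⟩
    by_cases h : x ∈ acc
    · exact ⟨u, by rw [List.foldl_cons, hu]; simp [PySem.Set.add, h]⟩
    · exact ⟨x :: u, by rw [List.foldl_cons, hu]; simp [PySem.Set.add, h]⟩

theorem pv_ofList_cons (r : Int) (t : List Int) :
    ∃ u, PySem.Set.ofList (r :: t) = r :: u := by
  rcases pv_ofList_aux t [r] with ⟨u, hu⟩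
  refine ⟨u, ?_⟩
  have h0 : PySem.Set.add PySem.Set.empty r = [r] := by
    simp [PySem.Set.add, PySem.Set.empty]
  simpa [PySem.Set.ofList, h0] using hu

-- A's result is the lexicographic best of the complement list
theorem solve_isBest (arr : List Int) (k : Int) (ns : List Int)
    (hns : ns = (arr.filter (fun x => !(PySem.Int.mod x k == 0))).map (fun x => k - PySem.Int.mod x k))
    (hne : ns ≠ []) :
    ∃ v c, IsBest ns v c ∧ solve arr k = (c - 1) * k + v + 1 := by
  rcases heq : ns with _ | ⟨n0, nt⟩
  · exact absurd heq hne
  unfold solve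
  rw [← hns, heq]
  have hlen : ¬ ((n0 :: nt).length = 0) := by simp
  rw [if_neg hlen]
  simp only
  rw [← PySem.Dict.counter_eq_foldl, PySem.Dict.keys_counter]
  obtain ⟨u, hS⟩ := pv_ofList_cons n0 nt
  rw [hS]
  simp only [List.foldl_cons, PySem.Dict.getD_counter, PySem.List.pyGetD_zero_cons]
  have hc0 : ((n0 :: nt).count n0 : Int) > 0 := count_pos_int _ _ (by simp)
  rw [if_pos hc0]
  have := afold_isBest (fun i => ((n0 :: nt).count i : Int)) u [n0]
    (n0, ((n0 :: nt).count n0 : Int)) rfl (by simp)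
    (by intro w hw; simp at hw; subst hw; right; exact ⟨rfl, le_refl _⟩)
  obtain ⟨hq1, hq2, hq3⟩ := this
  set q := u.foldl (fun m i =>
      if ((n0 :: nt).count i : Int) > m.2 then (i, ((n0 :: nt).count i : Int))
      else if ((n0 :: nt).count i : Int) == m.2 && decide (i > m.1) then (i, m.2) else m)
    (n0, ((n0 :: nt).count n0 : Int)) with hqdef
  refine ⟨q.1, q.2, ⟨?_, hq1, ?_⟩, rfl⟩
  · have : q.1 ∈ PySem.Set.ofList (n0 :: nt) := by rw [hS]; simpa using hq2
    exact (PySem.Set.mem_ofList _ _).mp this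
  · intro w hw
    have : w ∈ PySem.Set.ofList (n0 :: nt) := (PySem.Set.mem_ofList _ _).mpr hw
    rw [hS] at this
    exact hq3 w (by simpa using this)

-- ===== VERDICT (by name: the statement is the Claim_ definition above) =====
theorem solve_spec : Claim_equal_solve := by
  intro arr k _ _
  show solve arr k = solve_alt arr k
  set ns : List Int := (arr.filter (fun x => !(PySem.Int.mod x k == 0))).map (fun x => k - PySem.Int.mod x k) with hns
  set s : List Int := PySem.List.sorted ns (fun v => v) false with hs
  have hperm : s.Perm ns := PySem.List.sorted_perm ns (fun v => v) false
  have hpw : s.Pairwise (· ≤ ·) := by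
    have := PySem.List.sorted_pairwise (xs := ns) (key := fun v => v)
    simpa using this
  have hB := bfold_inv s [] (by simp) hpw (0, 0, 0, none) (Or.inl ⟨rfl, rfl⟩)
  simp only [List.nil_append] at hB
  rcases heq : ns with _ | ⟨n0, nt⟩
  · -- empty needs: both return 0
    have hsnil : s = [] := by
      rw [hs, heq]; rfl
    unfold solve solve_alt
    rw [← hns, ← hs, heq, hsnil]
    rfl
  · have hne : ns ≠ [] := by rw [heq]; simp
    obtain ⟨v, c, hbest, hval⟩ := solve_isBest arr k ns hns hne
    rw [hval]
    have hbestS : IsBest s v c := isBest_of_perm ns s hperm v c hbest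
    rcases hB with ⟨hnil, _⟩ | ⟨l, _, hl, _, _, hBbest⟩
    · exfalso
      rw [hnil] at hperm
      rw [heq] at hperm
      simpa using hperm.length_eq
    · set st := s.foldl bstep ((0, 0, 0, none) : Int × Int × Int × Option Int) with hst
      obtain ⟨hv, hc⟩ := isBest_unique s v c st.2.1 st.1 hbestS hBbest
      have hBe : solve_alt arr k =
          (if (((PySem.List.sorted ns (fun v => v) false).foldl bstep
              ((0, 0, 0, none) : Int × Int × Int × Option Int)).1 == 0) = true then 0
           else (((PySem.List.sorted ns (fun v => v) false).foldl bstep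
              ((0, 0, 0, none) : Int × Int × Int × Option Int)).1 - 1) * k +
             ((PySem.List.sorted ns (fun v => v) false).foldl bstep
              ((0, 0, 0, none) : Int × Int × Int × Option Int)).2.1 + 1) := rfl
      rw [hBe, ← hs, ← hst]
      have hcpos : (0 : Int) < st.1 := by
        obtain ⟨hm, he, _⟩ := hBbest
        rw [he]; exact count_pos_int s st.2.1 hm
      rw [if_neg (by simp; omega)]
      rw [hv, hc]
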